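-- pv_equiv track=rewrite | github.com/seefalert/telegram_bot_for_reading_books | telegram_bot_for_reading_books/services/file_handling.py | _get_part_text
-- ===== SOURCE A (Python) =====
-- def _get_part_text(text: str, start: int, size: int) -> tuple[str, int]:
--     text = text[start:start + size + 1]
--     end_string = 0
--     for marks in ',.!:;?':
--         if text.rfind(marks) > end_string:
--             end_string = text.rfind(marks)
--     text = text[:end_string + 1]
--     end_string = 0
--     if len(text) > size:
--         text = text[:end_string - 3]
--         for marks in '.,!:;?':
--             if text.rfind(marks) > end_string:
--                 end_string = text.rfind(marks)
--         text = text[:end_string + 1]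
--     return text, len(text)
-- ===== SOURCE B (Python) =====
-- _PUNCT = frozenset(',.!:;?')
--
--
-- def _cut_at_last_punct(s: str) -> str:
--     """Return s up to (and including) the last punctuation mark at index > 0,
--     or just s[0:1]-sized prefix fallback: one forward pass keeping the last hit."""
--     end = 0
--     for i, ch in enumerate(s):
--         if i > 0 and ch in _PUNCT:
--             end = i
--     return s[:end + 1]
--
--
-- def _get_part_text(text: str, start: int, size: int) -> tuple[str, int]:
--     part = _cut_at_last_punct(text[start:start + size + 1])
--     if len(part) > size:
--         part = _cut_at_last_punct(part[:-3])
--     return part, len(part)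
-- ===== Notes on version B (the rewrite author's own statement) =====
-- stated objective: idiomatic
-- what changed: B factors 'trim to the last punctuation mark at index > 0' into one helper that makes a single forward enumerate pass keeping the last hit, applied twice, replacing A's two inline blocks of six rfind passes with a running max.
import Mathlib
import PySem

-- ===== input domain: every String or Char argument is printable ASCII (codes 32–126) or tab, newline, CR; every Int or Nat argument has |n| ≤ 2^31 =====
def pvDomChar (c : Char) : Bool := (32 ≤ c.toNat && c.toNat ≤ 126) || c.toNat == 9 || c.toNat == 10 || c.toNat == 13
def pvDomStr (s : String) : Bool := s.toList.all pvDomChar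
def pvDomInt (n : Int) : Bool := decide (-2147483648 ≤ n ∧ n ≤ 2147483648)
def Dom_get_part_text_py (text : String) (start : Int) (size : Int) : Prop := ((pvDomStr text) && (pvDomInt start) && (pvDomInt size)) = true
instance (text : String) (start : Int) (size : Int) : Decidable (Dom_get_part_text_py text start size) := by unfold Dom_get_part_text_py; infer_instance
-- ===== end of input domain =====

-- B factors 'trim to the last punctuation mark at index > 0' into one helper doing a
-- single forward enumerate pass, applied twice, instead of A's two inline six-rfind
-- max blocks (idiomatic; same behaviour everywhere).

-- ===== PORT A =====
def pyPunct1 : List Char := [',', '.', '!', ':', ';', '?']   -- ',.!:;?'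
def pyPunct2 : List Char := ['.', ',', '!', ':', ';', '?']   -- '.,!:;?'

def get_part_text_py (text : String) (start : Int) (size : Int) : String × Int :=
  let t1 := PySem.List.slice text.toList (some start) (some (start + size + 1))
  let e1 := pyPunct1.foldl (fun e c =>
    if PySem.Chars.rfind t1 [c] > e then PySem.Chars.rfind t1 [c] else e) 0
  let t2 := PySem.List.slice t1 none (some (e1 + 1))
  if (t2.length : Int) > size then
    let t3 := PySem.List.slice t2 none (some ((0:Int) - 3))
    let e2 := pyPunct2.foldl (fun e c =>
      if PySem.Chars.rfind t3 [c] > e then PySem.Chars.rfind t3 [c] else e) 0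
    let t4 := PySem.List.slice t3 none (some (e2 + 1))
    (String.ofList t4, (t4.length : Int))
  else
    (String.ofList t2, (t2.length : Int))

-- ===== PORT B =====
-- _PUNCT = frozenset(',.!:;?')
def pvPunctSet : PySem.Set Char := PySem.Set.ofList [',', '.', '!', ':', ';', '?']

-- one forward pass: 'for i, ch in enumerate(s): if i > 0 and ch in _PUNCT: end = i'
def pvCut (s : List Char) : List Char :=
  let e := (PySem.List.enumerate s).foldl
    (fun e p => if 0 < p.1 ∧ p.2 ∈ pvPunctSet then p.1 else e) 0
  PySem.List.slice s none (some (e + 1))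

def get_part_text_py_alt (text : String) (start : Int) (size : Int) : String × Int :=
  let part := pvCut (PySem.List.slice text.toList (some start) (some (start + size + 1)))
  let part2 := if (part.length : Int) > size
    then pvCut (PySem.List.slice part none (some (-3)))
    else part
  (String.ofList part2, (part2.length : Int))

-- ===== PRECONDITION & SPEC =====
def Spec_get_part_text_py (text : String) (start : Int) (size : Int) (out : String × Int) : Prop := out = get_part_text_py_alt text start size
instance (text : String) (start : Int) (size : Int) (out : String × Int) : Decidable (Spec_get_part_text_py text start size out) := by unfold Spec_get_part_text_py; infer_instance

-- ===== CLAIM (what is proved, stated in full; the proofs are below) =====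
def Claim_equal_get_part_text_py : Prop := ∀ (text : String) (start : Int) (size : Int), Dom_get_part_text_py text start size → Spec_get_part_text_py text start size (get_part_text_py text start size)

-- ===== LEMMAS AND PROOFS =====

-- proof-side reference scan: last punctuation index in 1..m, else 0
def pvRevScan (cs : List Char) : Nat → Int
  | 0 => 0
  | i + 1 => if cs.getD (i + 1) ' ' ∈ pyPunct1 then ((i : Int) + 1) else pvRevScan cs i

-- single-char rfind never matches at index = length: step down once
theorem rfind_single_eq (cs : List Char) (c : Char) :
    PySem.Chars.rfind cs [c] = PySem.Chars.rfind.go cs [c] (cs.length - 1) := by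
  cases cs with
  | nil => rfl
  | cons x xs =>
    show PySem.Chars.rfind.go (x :: xs) [c] (xs.length + 1) = _
    rw [PySem.Chars.rfind.go]
    simp

theorem go_single_le (cs : List Char) (c : Char) :
    ∀ m : Nat, PySem.Chars.rfind.go cs [c] m ≤ (m : Int) := by
  intro m
  induction m with
  | zero => rw [PySem.Chars.rfind.go]; split <;> simp
  | succ j ih => rw [PySem.Chars.rfind.go]; split <;> omega

theorem isPrefixOf_single (cs : List Char) (c : Char) (j : Nat) (hj : j < cs.length) :
    [c].isPrefixOf (cs.drop j) = (cs.getD j ' ' == c) := by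
  rw [List.drop_eq_getElem_cons hj, List.getD_eq_getElem cs ' ' hj]
  simp [List.isPrefixOf]
  exact eq_comm

theorem go_single_step (cs : List Char) (c : Char) (j : Nat) (hj : j < cs.length) :
    PySem.Chars.rfind.go cs [c] j =
      if cs.getD j ' ' = c then (j : Int)
      else (if j = 0 then -1 else PySem.Chars.rfind.go cs [c] (j - 1)) := by
  cases j with
  | zero =>
    have h0 := isPrefixOf_single cs c 0 hj
    rw [List.drop_zero] at h0
    rw [PySem.Chars.rfind.go, h0]
    by_cases h : cs.getD 0 ' ' = c <;> simp
  | succ i =>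
    rw [PySem.Chars.rfind.go, isPrefixOf_single cs c (i + 1) hj]
    by_cases h : cs.getD (i + 1) ' ' = c <;> simp

-- A's if-update is a running max
theorem foldl_if_eq_foldl_max (P : List Char) (f : Char → Int) (e0 : Int) :
    P.foldl (fun e c => if f c > e then f c else e) e0
      = P.foldl (fun e c => max e (f c)) e0 := by
  apply PySem.List.foldl_congr_mem
  intro e c _
  rcases lt_or_ge e (f c) with h | h
  · simp [h, max_eq_right h.le]
  · have h' : ¬ (f c > e) := not_lt.mpr h
    simp [h', max_eq_left h]

theorem foldl_max_le_int (P : List Char) (f : Char → Int) (b : Int) :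
    ∀ e0, (∀ c ∈ P, f c ≤ b) → e0 ≤ b → P.foldl (fun e c => max e (f c)) e0 ≤ b := by
  induction P with
  | nil => intro e0 _ h0; exact h0
  | cons c P ih =>
    intro e0 h h0
    simp only [List.foldl_cons]
    exact ih _ (fun d hd => h d (List.mem_cons_of_mem _ hd)) (max_le h0 (h c (by simp)))

theorem scan_succ (cs : List Char) (k : Nat) :
    pvRevScan cs (k + 1)
      = if cs.getD (k + 1) ' ' ∈ pyPunct1 then ((k : Int) + 1) else pvRevScan cs k := rfl

-- the core: running max of per-char downward rfind scans = one downward scan over the set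
theorem fold_go_eq_scan (cs : List Char) (P : List Char)
    (hP : ∀ c, c ∈ P ↔ c ∈ pyPunct1) :
    ∀ m : Nat, m ≤ cs.length - 1 →
      P.foldl (fun e c => max e (PySem.Chars.rfind.go cs [c] m)) 0 = pvRevScan cs m := by
  intro m
  induction m with
  | zero =>
    intro _
    show _ = (0 : Int)
    apply le_antisymm
    · exact foldl_max_le_int P _ 0 0 (fun c _ => go_single_le cs c 0) le_rfl
    · exact (PySem.List.le_foldl_max_int P _ 0).1
  | succ j ih =>
    intro hm
    have hlt : j + 1 < cs.length := by omega
    rw [scan_succ]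
    by_cases hmem : cs.getD (j + 1) ' ' ∈ pyPunct1
    · rw [if_pos hmem]
      have hval : ∀ c ∈ P, PySem.Chars.rfind.go cs [c] (j + 1) ≤ ((j : Int) + 1) := by
        intro c _; have := go_single_le cs c (j + 1); push_cast at this ⊢; omega
      have hhit : PySem.Chars.rfind.go cs [cs.getD (j + 1) ' '] (j + 1) = ((j : Int) + 1) := by
        rw [go_single_step cs _ (j + 1) hlt]; push_cast; simp
      have hin : cs.getD (j + 1) ' ' ∈ P := (hP _).mpr hmem
      apply le_antisymm
      · exact foldl_max_le_int P _ _ 0 hval (by positivity)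
      · have h2 := (PySem.List.le_foldl_max_int P
          (fun c => PySem.Chars.rfind.go cs [c] (j + 1)) 0).2 _ hin
        rw [hhit] at h2
        exact h2
    · rw [if_neg hmem, ← ih (by omega)]
      apply PySem.List.foldl_congr_mem
      intro e c hc
      have hne : cs.getD (j + 1) ' ' ≠ c := fun h => hmem (h ▸ (hP c).mp hc)
      rw [go_single_step cs c (j + 1) hlt]
      rw [List.getD_eq_getElem?_getD] at hne
      simp [hne]

-- A's whole rfind block equals the reference scan, for any order of the same punctuation set
theorem block_eq (cs : List Char) (P : List Char) (hP : ∀ c, c ∈ P ↔ c ∈ pyPunct1) :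
    P.foldl (fun e c =>
      if PySem.Chars.rfind cs [c] > e then PySem.Chars.rfind cs [c] else e) 0
      = pvRevScan cs (cs.length - 1) := by
  rw [foldl_if_eq_foldl_max]
  have h : (fun (e : Int) c => max e (PySem.Chars.rfind cs [c]))
      = (fun e c => max e (PySem.Chars.rfind.go cs [c] (cs.length - 1))) := by
    funext e c; rw [rfind_single_eq]
  rw [h]
  exact fold_go_eq_scan cs P hP (cs.length - 1) le_rfl

theorem punct1_mem : ∀ c, c ∈ pyPunct1 ↔ c ∈ pyPunct1 := fun _ => Iff.rfl

theorem punct2_mem : ∀ c, c ∈ pyPunct2 ↔ c ∈ pyPunct1 := by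
  intro c; simp [pyPunct2, pyPunct1]; tauto

theorem punctSet_eq : pvPunctSet = pyPunct1 := by decide

-- the scan only looks at indices ≤ m, so a tail appended past m is invisible
theorem scan_append (ds : List Char) (c : Char) :
    ∀ m : Nat, m < ds.length → pvRevScan (ds ++ [c]) m = pvRevScan ds m := by
  intro m
  induction m with
  | zero => intro _; rfl
  | succ j ih =>
    intro hm
    rw [scan_succ, scan_succ, List.getD_append _ _ _ _ (by omega)]
    split_ifs
    · rfl
    · exact ih (by omega)

-- B's forward enumerate fold equals the reference scan
theorem fwd_eq_scan (s : List Char) :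
    (PySem.List.enumerate s).foldl
      (fun e p => if 0 < p.1 ∧ p.2 ∈ pvPunctSet then p.1 else e) 0
      = pvRevScan s (s.length - 1) := by
  induction s using List.reverseRecOn with
  | nil => rfl
  | append_singleton ds c ih =>
    rw [show PySem.List.enumerate (ds ++ [c]) = PySem.List.enumerate ds ++ [((ds.length : Int), c)] by
      rw [PySem.List.enumerate_append]; norm_num]
    rw [List.foldl_append, ih]
    simp only [List.foldl_cons, List.foldl_nil, punctSet_eq]
    cases ds with
    | nil => simp [pvRevScan]
    | cons d ds' =>
      have hlen : (d :: ds' ++ [c]).length - 1 = ds'.length + 1 := by simp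
      rw [hlen, scan_succ]
      have hget : (d :: ds' ++ [c]).getD (ds'.length + 1) ' ' = c := by
        rw [show ds'.length + 1 = (d :: ds').length by simp,
          List.getD_eq_getElem?_getD, List.getElem?_append_right (by simp)]
        simp
      rw [hget]
      by_cases h : c ∈ pyPunct1
      · have hpos : (0 : Int) < ((d :: ds').length : Int) := by simp
        simp [h]
      · simp only [h, and_false, if_false]
        have hs := scan_append (d :: ds') c ds'.length (by simp)
        simp only [List.cons_append] at hs
        simp only [List.length_cons, Nat.add_sub_cancel]
        exact hs.symm

-- ===== VERDICT (by name: the statement is the Claim_ definition above) =====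
theorem get_part_text_py_spec : Claim_equal_get_part_text_py := by
  intro text start size _
  unfold Spec_get_part_text_py get_part_text_py get_part_text_py_alt pvCut
  simp only [block_eq _ pyPunct1 punct1_mem, block_eq _ pyPunct2 punct2_mem, fwd_eq_scan,
    show ((0:Int) - 3) = (-3 : Int) from by norm_num]
  split <;> rfl
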